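-- pv_equiv track=rewrite | github.com/MerajBighamian/Cinema-app | project of delcte space in ends of strings.py | del_space_string
-- ===== SOURCE A (Python) =====
-- def del_space_string(string):
--     index=None
--     i=len(string)
--     while(i>0):
--         if string[i-1] != " ":
--             index=i
--             break
--         i-=1
--     new_string=string[:index]
--     return new_string
-- ===== SOURCE B (Python) =====
-- def del_space_string(string):
--     index = None
--     for i, c in enumerate(string):
--         if c != " ":
--             index = i + 1
--     new_string = string[:index]
--     return new_string
-- ===== Notes on version B (the rewrite author's own statement) =====
-- stated objective: alternative
-- what changed: Replaces the backward while-loop with early break (scan from the end, break at the first non-space) by a single forward for-loop over enumerate that records end-of-last-non-space-run, keeping index=None so empty/all-space strings are returned unchanged.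
import Mathlib
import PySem

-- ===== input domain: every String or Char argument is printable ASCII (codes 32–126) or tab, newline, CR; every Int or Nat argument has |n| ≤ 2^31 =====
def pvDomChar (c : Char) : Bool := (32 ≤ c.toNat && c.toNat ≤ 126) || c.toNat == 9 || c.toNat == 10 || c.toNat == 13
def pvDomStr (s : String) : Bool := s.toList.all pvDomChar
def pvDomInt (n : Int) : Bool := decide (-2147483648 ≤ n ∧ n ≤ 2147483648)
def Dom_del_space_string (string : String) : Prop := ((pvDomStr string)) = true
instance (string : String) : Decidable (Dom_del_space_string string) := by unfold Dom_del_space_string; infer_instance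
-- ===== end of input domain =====

-- B replaces A's backward while-loop-with-break by one forward pass over enumerate; same O(n) cost.

-- ===== PORT A =====
-- the while(i>0) loop, counting i down; break returns some i (the value assigned to index)
def del_space_aLoop (cs : List Char) : Nat → Option Nat
  | 0 => none
  | i + 1 =>
    match PySem.List.pyGet? cs (i : Int) with   -- string[i-1]; i-1 is in range whenever i ≤ len, so the none branch is unreachable
    | some c => if c ≠ ' ' then some (i + 1) else del_space_aLoop cs i
    | none => none

-- new_string = string[:index]; index=None slices to the end
def del_space_string (string : String) : String :=
  String.ofList (PySem.List.slice string.toList none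
    ((del_space_aLoop string.toList string.toList.length).map (fun n => (n : Int))))

-- ===== PORT B =====
def del_space_string_alt (string : String) : String :=
  String.ofList (PySem.List.slice string.toList none
    ((PySem.List.enumerate string.toList 0).foldl
      (fun acc p => if p.2 ≠ ' ' then some (p.1 + 1) else acc) (none : Option Int)))

-- ===== PRECONDITION & SPEC =====
def Spec_del_space_string (string : String) (out : String) : Prop := out = del_space_string_alt string
instance (string : String) (out : String) : Decidable (Spec_del_space_string string out) := by unfold Spec_del_space_string; infer_instance

-- ===== CLAIM (what is proved, stated in full; the proofs are below) =====
def Claim_equal_del_space_string : Prop := ∀ (string : String), Dom_del_space_string string → Spec_del_space_string string (del_space_string string)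

-- ===== LEMMAS AND PROOFS =====
theorem del_space_aLoop_append (cs : List Char) (c : Char) (i : Nat) (h : i ≤ cs.length) :
    del_space_aLoop (cs ++ [c]) i = del_space_aLoop cs i := by
  induction i with
  | zero => rfl
  | succ i ih =>
    have hlt : i < cs.length := h
    simp only [del_space_aLoop, PySem.List.pyGet?_natCast,
      List.getElem?_append_left hlt, ih (Nat.le_of_lt hlt)]

theorem del_space_loops_eq (cs : List Char) :
    (del_space_aLoop cs cs.length).map (fun n => (n : Int)) =
      (PySem.List.enumerate cs 0).foldl
        (fun acc p => if p.2 ≠ ' ' then some (p.1 + 1) else acc) (none : Option Int) := by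
  induction cs using List.reverseRecOn with
  | nil => rfl
  | append_singleton cs c ih =>
    rw [PySem.List.enumerate_append, List.foldl_append]
    simp only [List.length_append, List.length_singleton, PySem.List.enumerate_cons,
      PySem.List.enumerate_nil, List.foldl_cons, List.foldl_nil]
    by_cases hc : c = ' '
    · simp only [del_space_aLoop, hc, PySem.List.pyGet?_natCast,
        List.getElem?_append_right (Nat.le_refl cs.length), Nat.sub_self,
        List.getElem?_cons_zero, ne_eq, not_true_eq_false, if_neg, not_false_eq_true]
      rw [del_space_aLoop_append cs ' ' cs.length (Nat.le_refl _), ih]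
    · simp only [del_space_aLoop, PySem.List.pyGet?_natCast,
        List.getElem?_append_right (Nat.le_refl cs.length), Nat.sub_self,
        List.getElem?_cons_zero, ne_eq, hc, not_false_eq_true, if_true]
      simp

-- ===== VERDICT (by name: the statement is the Claim_ definition above) =====
theorem del_space_string_spec : Claim_equal_del_space_string := by
  intro s _
  unfold Spec_del_space_string del_space_string del_space_string_alt
  rw [del_space_loops_eq]
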